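-- pv_equiv track=rewrite | github.com/loco9939/Programmers-Python | Day13/Yiju.py | solution
-- ===== SOURCE A (Python) =====
-- def solution(a, b, c, d):
--     answer = 0
--
--     # 1~6까지 숫자가 몇개인지 세어서 obj에 dictionary로 할당
--     arr = [a,b,c,d]
--     obj = {1:0,2:0,3:0,4:0,5:0,6:0}
--     for i in arr:
--         if (i == 1):
--             obj[1] += 1
--         elif (i == 2):
--             obj[2] += 1
--         elif (i == 3):
--             obj[3] += 1
--         elif (i == 4):
--             obj[4] += 1
--         elif (i == 5):
--             obj[5] += 1
--         else:
--             obj[6] += 1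
--
--     # 갯수가 0인 주사위는 제외하여 dices 리스트에 할당
--     dices = []
--     for key in obj:
--         if (obj[key] != 0):
--             dices.append(key)
--
--     # dices의 길이에 따라 조건분기
--     if (len(dices) == 1):
--         answer = 1111 * dices[0]
--     elif (len(dices) == 2):
--         if (obj[dices[0]] == obj[dices[1]]):
--             answer = (dices[0]+dices[1])*abs(dices[0] - dices[1])
--         elif (obj[dices[0]] > obj[dices[1]]):
--             answer = (10*dices[0]+dices[1])**2
--         else:
--             answer = (10*dices[1]+dices[0])**2
--     elif (len(dices) == 3):
--         if (obj[dices[0]] != 1):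
--             answer = dices[1] * dices[2]
--         elif (obj[dices[1]] != 1):
--             answer = dices[0] * dices[2]
--         else:
--             answer = dices[0] * dices[1]
--     else:
--         answer = min(a,b,c,d)
--     return answer
-- ===== SOURCE B (Python) =====
-- def solution(a, b, c, d):
--     # Read each die as one of the six faces (a die not showing 1-5 shows 6),
--     # sort the four faces, and score by direct equality comparisons on the
--     # sorted quadruple: with only four dice no counting structure is needed.
--     p, q, r, s = sorted(x if x in (1, 2, 3, 4, 5) else 6 for x in (a, b, c, d))
--     if p == s:                      # four of a kind
--         return 1111 * p
--     if p == r:                      # three of a kind, triple is the low face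
--         return (10 * p + s) ** 2
--     if q == s:                      # three of a kind, triple is the high face
--         return (10 * q + p) ** 2
--     if p == q and r == s:           # two pair
--         return (p + r) * (r - p)
--     if p == q:                      # one pair: product of the other two
--         return r * s
--     if q == r:
--         return p * s
--     if r == s:
--         return p * q
--     return min(a, b, c, d)          # all faces distinct: smallest die
-- ===== Notes on version B (the rewrite author's own statement) =====
-- stated objective: simpler
-- what changed: B sorts the four face values and scores by direct equality comparisons on the sorted quadruple (four/three of a kind, two pair, one pair, all distinct), instead of A's six-way if/elif counting dict, present-faces list and length branching with positional count re-lookups; a die not showing 1-5 is read as the sixth face, matching A's else bucket.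
import Mathlib
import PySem

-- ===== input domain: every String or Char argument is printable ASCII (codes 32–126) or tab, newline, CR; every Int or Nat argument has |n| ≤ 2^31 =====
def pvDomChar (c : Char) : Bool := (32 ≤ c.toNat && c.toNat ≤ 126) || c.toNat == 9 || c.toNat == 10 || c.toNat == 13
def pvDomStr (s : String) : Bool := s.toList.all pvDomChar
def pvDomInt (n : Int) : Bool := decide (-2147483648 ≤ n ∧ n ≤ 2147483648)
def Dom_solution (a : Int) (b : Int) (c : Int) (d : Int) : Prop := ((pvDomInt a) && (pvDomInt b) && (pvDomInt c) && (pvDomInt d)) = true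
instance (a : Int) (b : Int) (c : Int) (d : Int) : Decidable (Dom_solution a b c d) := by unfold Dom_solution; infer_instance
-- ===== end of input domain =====

-- B sorts the four face values and scores by direct equality comparisons on the sorted
-- quadruple, with no counting dict, present-faces list or count lookups (objective: simpler).

-- ===== PORT A =====
-- the body of A's counting loop: the if/elif chain on one die i
def stepA (obj : PySem.Dict Int Int) (i : Int) : PySem.Dict Int Int :=
  if i = 1 then obj.modify 1 0 (· + 1)
  else if i = 2 then obj.modify 2 0 (· + 1)
  else if i = 3 then obj.modify 3 0 (· + 1)
  else if i = 4 then obj.modify 4 0 (· + 1)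
  else if i = 5 then obj.modify 5 0 (· + 1)
  else obj.modify 6 0 (· + 1)

-- obj = {1:0,2:0,3:0,4:0,5:0,6:0}
def objA0 : PySem.Dict Int Int := PySem.Dict.ofList [(1,0),(2,0),(3,0),(4,0),(5,0),(6,0)]

-- everything after the counting loop: dices and the length branching; m is min(a,b,c,d),
-- computed once by the caller and only used in the final else branch (as in A).
-- All list indexing is in range by the length guard of its branch, so pyGetD's default is never used.
def solutionFinish (obj : PySem.Dict Int Int) (m : Int) : Int :=
  let dices := obj.keys.foldl (fun ds k => if obj.getD k 0 ≠ 0 then ds ++ [k] else ds) ([] : List Int)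
  if dices.length = 1 then 1111 * PySem.List.pyGetD dices 0 0
  else if dices.length = 2 then
    let d0 := PySem.List.pyGetD dices 0 0
    let d1 := PySem.List.pyGetD dices 1 0
    if obj.getD d0 0 = obj.getD d1 0 then (d0 + d1) * ((d0 - d1).natAbs : Int)  -- abs(d0-d1)
    else if obj.getD d0 0 > obj.getD d1 0 then (10 * d0 + d1) ^ 2
    else (10 * d1 + d0) ^ 2
  else if dices.length = 3 then
    let d0 := PySem.List.pyGetD dices 0 0
    let d1 := PySem.List.pyGetD dices 1 0
    let d2 := PySem.List.pyGetD dices 2 0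
    if obj.getD d0 0 ≠ 1 then d1 * d2
    else if obj.getD d1 0 ≠ 1 then d0 * d2
    else d0 * d1
  else m

def solution (a : Int) (b : Int) (c : Int) (d : Int) : Int :=
  solutionFinish (List.foldl stepA objA0 [a, b, c, d]) (min a (min b (min c d)))

-- ===== PORT B =====
-- x if x in (1, 2, 3, 4, 5) else 6
def faceB (x : Int) : Int := if x = 1 ∨ x = 2 ∨ x = 3 ∨ x = 4 ∨ x = 5 then x else 6

-- the equality-comparison chain on the sorted faces l; m is min(a,b,c,d), computed once by
-- the caller and only used in the final return. All indexing is in range (l has length 4).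
def solutionAltFinish (l : List Int) (m : Int) : Int :=
  let p := PySem.List.pyGetD l 0 0
  let q := PySem.List.pyGetD l 1 0
  let r := PySem.List.pyGetD l 2 0
  let s := PySem.List.pyGetD l 3 0
  if p = s then 1111 * p
  else if p = r then (10 * p + s) ^ 2
  else if q = s then (10 * q + p) ^ 2
  else if p = q ∧ r = s then (p + r) * (r - p)
  else if p = q then r * s
  else if q = r then p * s
  else if r = s then p * q
  else m

def solution_alt (a : Int) (b : Int) (c : Int) (d : Int) : Int :=
  solutionAltFinish (PySem.List.sorted (List.map faceB [a, b, c, d]) (fun x => x) false)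
    (min a (min b (min c d)))

-- ===== PRECONDITION & SPEC =====
def Spec_solution (a : Int) (b : Int) (c : Int) (d : Int) (out : Int) : Prop := out = solution_alt a b c d
instance (a : Int) (b : Int) (c : Int) (d : Int) (out : Int) : Decidable (Spec_solution a b c d out) := by unfold Spec_solution; infer_instance

-- ===== CLAIM (what is proved, stated in full; the proofs are below) =====
def Claim_equal_solution : Prop := ∀ (a : Int) (b : Int) (c : Int) (d : Int), Dom_solution a b c d → Spec_solution a b c d (solution a b c d)

-- ===== LEMMAS AND PROOFS =====

-- A's if/elif chain on a die i is: bump the count of i's face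
theorem stepA_modify (obj : PySem.Dict Int Int) (i : Int) :
    stepA obj i = obj.modify (faceB i) 0 (· + 1) := by
  by_cases h1 : i = 1
  · subst h1; rfl
  · by_cases h2 : i = 2
    · subst h2; rfl
    · by_cases h3 : i = 3
      · subst h3; rfl
      · by_cases h4 : i = 4
        · subst h4; rfl
        · by_cases h5 : i = 5
          · subst h5; rfl
          · have hc : faceB i = 6 := by
              unfold faceB; rw [if_neg]; tauto
            rw [hc]; simp [stepA, h1, h2, h3, h4, h5]

theorem faceB_mem (i : Int) : faceB i ∈ ([1, 2, 3, 4, 5, 6] : List Int) := by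
  unfold faceB; split_ifs with h
  · simp only [List.mem_cons, List.not_mem_nil, or_false]; tauto
  · simp

theorem faceB_id_of_mem (i : Int) (h : i ∈ ([1, 2, 3, 4, 5, 6] : List Int)) : faceB i = i := by
  fin_cases h <;> rfl

-- A's count dict is determined by the face counts of the face list
theorem objA_char (l : List Int) (h : ∀ i ∈ l, i ∈ ([1, 2, 3, 4, 5, 6] : List Int)) :
    List.foldl stepA objA0 l
      = PySem.Dict.mk (([1, 2, 3, 4, 5, 6] : List Int).map fun k => (k, (l.count k : Int))) := by
  have h1 : List.foldl stepA objA0 l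
      = l.foldl (fun d x => d.modify x 0 (· + 1)) objA0 := by
    apply PySem.List.foldl_congr_mem
    intro acc x hx
    rw [stepA_modify, faceB_id_of_mem x (h x hx)]
  rw [h1]
  have hk : (l.foldl (fun d x => d.modify x 0 (· + 1)) objA0).keys = [1, 2, 3, 4, 5, 6] := by
    rw [PySem.Dict.keys_foldl_modify]
    have hobj : objA0.keys = [1, 2, 3, 4, 5, 6] := rfl
    rw [hobj, PySem.Set.update_eq_append_filter]
    have hfil : (PySem.Set.ofList l).filter
        (fun y => !(PySem.Set.contains [1, 2, 3, 4, 5, 6] y)) = [] := by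
      apply List.filter_eq_nil_iff.mpr
      intro a ha
      have ham : a ∈ l := by simpa [PySem.Set.mem_ofList] using ha
      have ham6 := h a ham
      fin_cases ham6 <;> decide
    rw [hfil, List.append_nil]
  have hnd : (l.foldl (fun d x => d.modify x 0 (· + 1)) objA0).keys.Nodup := by
    rw [hk]; decide
  apply PySem.Dict.ext
  rw [PySem.Dict.items_eq_map_keys _ hnd 0, hk]
  show List.map _ ([1, 2, 3, 4, 5, 6] : List Int)
      = List.map (fun k => (k, (l.count k : Int))) [1, 2, 3, 4, 5, 6]
  apply List.map_congr_left
  intro k hkm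
  have hg : (l.foldl (fun d x => d.modify x 0 (· + 1)) objA0).getD k 0
      = objA0.getD k 0 + l.count k := by rw [PySem.Dict.getD_foldl_modify_add_one]
  have h0 : objA0.getD k 0 = 0 := by fin_cases hkm <;> rfl
  rw [hg, h0, zero_add]

-- hence A's dict only sees the multiset of faces
theorem objA_perm (l l' : List Int) (h : ∀ i ∈ l, i ∈ ([1, 2, 3, 4, 5, 6] : List Int))
    (hp : l.Perm l') : List.foldl stepA objA0 l = List.foldl stepA objA0 l' := by
  rw [objA_char l h, objA_char l' (fun i hi => h i (hp.mem_iff.mpr hi))]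
  have : ∀ k : Int, l.count k = l'.count k := fun k => hp.count_eq k
  simp only [this]

-- whether A takes a non-min branch, as a Bool on obj only
def condA (obj : PySem.Dict Int Int) : Bool :=
  let dices := obj.keys.foldl (fun ds k => if obj.getD k 0 ≠ 0 then ds ++ [k] else ds) ([] : List Int)
  dices.length == 1 || dices.length == 2 || dices.length == 3

-- whether B takes a non-min branch, as a Bool on the sorted face list only
def condB (l : List Int) : Bool :=
  let p := PySem.List.pyGetD l 0 0
  let q := PySem.List.pyGetD l 1 0
  let r := PySem.List.pyGetD l 2 0
  let s := PySem.List.pyGetD l 3 0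
  p == s || p == r || q == s || (p == q && r == s) || p == q || q == r || r == s

-- m flows through solutionFinish only via the final else branch
theorem finishA_shape (obj : PySem.Dict Int Int) (m : Int) :
    solutionFinish obj m = if condA obj then solutionFinish obj 0 else m := by
  simp only [solutionFinish, condA]
  split_ifs <;> simp_all

theorem finishB_shape (l : List Int) (m : Int) :
    solutionAltFinish l m = if condB l then solutionAltFinish l 0 else m := by
  simp only [solutionAltFinish, condB]
  split_ifs <;> simp_all

-- the finite heart: on every ascending face 4-tuple the two pipelines agree at m = 0
-- and take their min branches together
set_option maxHeartbeats 2000000 in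
theorem finite_check : ∀ p ∈ ([1, 2, 3, 4, 5, 6] : List Int), ∀ q ∈ ([1, 2, 3, 4, 5, 6] : List Int),
    ∀ r ∈ ([1, 2, 3, 4, 5, 6] : List Int), ∀ s ∈ ([1, 2, 3, 4, 5, 6] : List Int),
    p ≤ q → q ≤ r → r ≤ s →
      (solutionFinish (List.foldl stepA objA0 [p, q, r, s]) 0
         = solutionAltFinish [p, q, r, s] 0)
      ∧ (condA (List.foldl stepA objA0 [p, q, r, s]) = condB [p, q, r, s]) := by
  decide

-- agreement at m = 0 plus matching branch flags forces agreement at every m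
theorem agree_all (obj : PySem.Dict Int Int) (l : List Int)
    (h0 : solutionFinish obj 0 = solutionAltFinish l 0)
    (hc : condA obj = condB l) (m : Int) :
    solutionFinish obj m = solutionAltFinish l m := by
  rw [finishA_shape obj m, finishB_shape l m, hc]
  cases hB : condB l <;> simp_all

theorem list_len4 (xs : List Int) (h : xs.length = 4) :
    ∃ p q r s : Int, xs = [p, q, r, s] := by
  match xs, h with
  | [p, q, r, s], _ => exact ⟨p, q, r, s, rfl⟩

-- ===== VERDICT (by name: the statement is the Claim_ definition above) =====
theorem solution_spec : Claim_equal_solution := by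
  intro a b c d _
  unfold Spec_solution solution solution_alt
  simp only [List.map_cons, List.map_nil]
  have hmem : ∀ i ∈ [faceB a, faceB b, faceB c, faceB d],
      i ∈ ([1, 2, 3, 4, 5, 6] : List Int) := by
    intro i hi
    simp only [List.mem_cons, List.not_mem_nil, or_false] at hi
    rcases hi with h | h | h | h <;> subst h <;>
      [exact faceB_mem a; exact faceB_mem b; exact faceB_mem c; exact faceB_mem d]
  have hid : ∀ x : Int, faceB (faceB x) = faceB x :=
    fun x => faceB_id_of_mem _ (faceB_mem x)
  have hfold : List.foldl stepA objA0 [a, b, c, d]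
      = List.foldl stepA objA0 [faceB a, faceB b, faceB c, faceB d] := by
    simp only [List.foldl_cons, List.foldl_nil, stepA_modify, hid]
  rw [hfold]
  -- replace the face list by its sorted rearrangement on A's side
  have hperm : (PySem.List.sorted [faceB a, faceB b, faceB c, faceB d]
      (fun x => x) false).Perm [faceB a, faceB b, faceB c, faceB d] :=
    PySem.List.sorted_perm _ _ _
  have hA := objA_perm [faceB a, faceB b, faceB c, faceB d]
    (PySem.List.sorted [faceB a, faceB b, faceB c, faceB d] (fun x => x) false)
    hmem hperm.symm
  rw [hA]
  -- the sorted face list is an ascending literal 4-tuple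
  have hlen : (PySem.List.sorted [faceB a, faceB b, faceB c, faceB d]
      (fun x => x) false).length = 4 := by
    rw [PySem.List.length_sorted]; rfl
  obtain ⟨p, q, r, s, hsl⟩ := list_len4 _ hlen
  have hpw := PySem.List.sorted_pairwise [faceB a, faceB b, faceB c, faceB d] (fun x => x)
  rw [hsl] at hpw
  simp only [List.pairwise_cons, List.mem_cons, List.not_mem_nil, or_false,
    List.Pairwise.nil, and_true] at hpw
  have hm : ∀ i ∈ [p, q, r, s], i ∈ ([1, 2, 3, 4, 5, 6] : List Int) := by
    intro i hi
    apply hmem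
    apply hperm.mem_iff.mp
    rw [hsl]; exact hi
  rw [hsl]
  obtain ⟨h0, hc⟩ := finite_check p (hm p (by simp)) q (hm q (by simp)) r (hm r (by simp))
    s (hm s (by simp))
    (hpw.1 q (Or.inl rfl)) (hpw.2.1 r (Or.inl rfl)) (hpw.2.2.1 s rfl)
  exact agree_all _ _ h0 hc _
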